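-- pv_equiv track=rewrite | github.com/Gauravism2017/twitter_bot | twitter/bot/clean.py | extractSentencePairs
-- ===== SOURCE A (Python) =====
-- def extractSentencePairs(conversations):
--     qa_pairs = []
--     for conversation in conversations:
--         for i in range(len(conversation["lines"]) - 1):
--             inputLine = conversation["lines"][i]["text"].strip()
--             targetLine = conversation["lines"][i+1]["text"].strip()
--             if inputLine and targetLine:
--                 qa_pairs.append([inputLine, targetLine])
--
--     return qa_pairs
-- ===== SOURCE B (Python) =====
-- def extractSentencePairs(conversations):
--     # Back-to-front: walk conversations and lines in reverse, carrying only the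
--     # previously seen (stripped) text, then reverse the accumulated result once.
--     qa_pairs = []
--     for conversation in reversed(conversations):
--         prev = None
--         for line in reversed(conversation["lines"]):
--             cur = line["text"].strip()
--             if prev is not None and cur and prev:
--                 qa_pairs.append([cur, prev])
--             prev = cur
--     qa_pairs.reverse()
--     return qa_pairs
-- ===== Notes on version B (the rewrite author's own statement) =====
-- stated objective: alternative
-- what changed: B builds the result back-to-front: it walks conversations and each conversation's lines in reverse carrying only the previously seen stripped text (no indexing, no intermediate list, each line stripped once), appends pairs in reverse order and reverses the accumulator once at the end; Pre_ excludes conversations missing a 'lines' key or containing a line without a 'text' key (A raises KeyError there, except when such a line sits in a conversation of at most one line, where A's index loop never touches it and returns [] while B raises).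
-- outside the precondition, e.g. on extractSentencePairs([{'lines': [{'note': 'no text key'}]}]): A returns [], B raises KeyError
import Mathlib
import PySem

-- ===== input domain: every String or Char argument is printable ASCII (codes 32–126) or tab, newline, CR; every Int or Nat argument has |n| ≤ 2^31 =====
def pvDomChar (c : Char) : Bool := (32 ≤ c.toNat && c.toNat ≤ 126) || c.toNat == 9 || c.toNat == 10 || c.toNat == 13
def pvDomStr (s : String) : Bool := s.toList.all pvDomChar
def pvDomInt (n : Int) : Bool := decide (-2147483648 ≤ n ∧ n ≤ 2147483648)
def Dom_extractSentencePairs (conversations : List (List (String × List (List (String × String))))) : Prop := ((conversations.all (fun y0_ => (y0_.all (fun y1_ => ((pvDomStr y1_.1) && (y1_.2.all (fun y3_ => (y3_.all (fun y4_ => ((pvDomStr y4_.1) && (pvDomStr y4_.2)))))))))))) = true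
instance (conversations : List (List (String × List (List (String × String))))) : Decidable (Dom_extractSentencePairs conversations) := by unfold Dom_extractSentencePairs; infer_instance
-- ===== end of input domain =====

-- B builds the result back-to-front: reversed traversal of conversations and lines carrying only
-- the previously seen stripped text, one final reverse (alternative decomposition, no indexing).

-- ===== PORT A =====
-- index loop over range(len(lines)-1), stripping lines[i] and lines[i+1] at each step
def extractSentencePairs (conversations : List (List (String × List (List (String × String))))) : List (List String) :=
  conversations.foldl (fun qa_pairs conversation =>
    let lines := ((PySem.Dict.mk conversation).get? "lines").getD []
    (PySem.List.pyRange 0 ((lines.length : Int) - 1) 1).foldl (fun qa_pairs i =>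
      let inputLine := PySem.Str.strip (((PySem.Dict.mk (PySem.List.pyGetD lines i [])).get? "text").getD "")
      let targetLine := PySem.Str.strip (((PySem.Dict.mk (PySem.List.pyGetD lines (i + 1) [])).get? "text").getD "")
      if inputLine ≠ "" ∧ targetLine ≠ "" then qa_pairs ++ [[inputLine, targetLine]] else qa_pairs)
      qa_pairs) []

-- ===== PORT B =====
-- reversed(conversations) / reversed(lines) with one-element memory `prev`, then qa_pairs.reverse()
def extractSentencePairs_alt (conversations : List (List (String × List (List (String × String))))) : List (List String) :=
  let qa_pairs := conversations.reverse.foldl (fun qa_pairs conversation =>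
    ((((PySem.Dict.mk conversation).get? "lines").getD []).reverse.foldl
      (fun (st : List (List String) × Option String) line =>
        let cur := PySem.Str.strip (((PySem.Dict.mk line).get? "text").getD "")
        (match st.2 with
          | some p => if cur ≠ "" ∧ p ≠ "" then st.1 ++ [[cur, p]] else st.1
          | none => st.1,
         some cur))
      (qa_pairs, none)).1) []
  qa_pairs.reverse

-- ===== PRECONDITION & SPEC =====
-- Pre_ excludes the inputs where a conversation lacks a "lines" key or some line lacks a
-- "text" key: there Python A raises KeyError, except in the corner of a textless line inside a
-- conversation with at most one line, where A's empty result is an accident of its index loop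
-- never touching the line and B (which strips every line) raises KeyError.
def Pre_extractSentencePairs (conversations : List (List (String × List (List (String × String))))) : Prop :=
  (conversations.all (fun conversation =>
    (conversation.any (fun p => p.1 == "lines")) &&
    ((((PySem.Dict.mk conversation).get? "lines").getD []).all
      (fun line => line.any (fun p => p.1 == "text"))))) = true
instance (conversations : List (List (String × List (List (String × String))))) : Decidable (Pre_extractSentencePairs conversations) := by unfold Pre_extractSentencePairs; infer_instance

def pvWitness_extractSentencePairs : (List (List (String × List (List (String × String))))) :=
  [[("lines", [[("text", " hi ")], [("text", "yo")]])]]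

def Spec_extractSentencePairs (conversations : List (List (String × List (List (String × String))))) (out : List (List String)) : Prop := out = extractSentencePairs_alt conversations
instance (conversations : List (List (String × List (List (String × String))))) (out : List (List String)) : Decidable (Spec_extractSentencePairs conversations out) := by unfold Spec_extractSentencePairs; infer_instance

-- ===== CLAIM (what is proved, stated in full; the proofs are below) =====
def Claim_equal_extractSentencePairs : Prop := ∀ (conversations : List (List (String × List (List (String × String))))), Dom_extractSentencePairs conversations → Pre_extractSentencePairs conversations → Spec_extractSentencePairs conversations (extractSentencePairs conversations)

-- ===== LEMMAS AND PROOFS =====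

-- canonical pair list of a list of (already stripped) texts
def pairsSpec : List String → List (List String)
  | [] => []
  | [_] => []
  | a :: b :: r => (if a ≠ "" ∧ b ≠ "" then [[a, b]] else []) ++ pairsSpec (b :: r)

-- A's indexed fold over range(len ts - 1) reading g(ts[i]), g(ts[i+1]) equals the fold
-- over zip(map g ts, tail (map g ts)).
theorem pairs_fold {α γ : Type} (g : α → String) (dflt : α) (f : γ → String → String → γ) :
    ∀ (ts : List α) (init : γ),
    (PySem.List.pyRange 0 ((ts.length : Int) - 1) 1).foldl
        (fun acc i => f acc (g (PySem.List.pyGetD ts i dflt)) (g (PySem.List.pyGetD ts (i + 1) dflt))) init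
      = ((ts.map g).zip (ts.map g).tail).foldl (fun acc p => f acc p.1 p.2) init := by
  intro ts
  induction ts with
  | nil =>
    intro init
    simp [PySem.List.pyRange_one_eq_nil]
  | cons t ts ih =>
    cases ts with
    | nil =>
      intro init
      simp [PySem.List.pyRange_one_eq_nil]
    | cons t' rest =>
      intro init
      have hlen : ((t :: t' :: rest).length : Int) - 1 = (rest.length : Int) + 1 := by
        simp
      rw [hlen, PySem.List.pyRange_one_cons (by positivity)]
      simp only [List.foldl_cons]
      have h0 : PySem.List.pyGetD (t :: t' :: rest) 0 dflt = t := by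
        simp [PySem.List.pyGetD_zero_cons]
      have h1 : PySem.List.pyGetD (t :: t' :: rest) (0 + 1) dflt = t' := by
        have : ((0 : Int) + 1) = ((1 : Nat) : Int) := by norm_num
        rw [this, PySem.List.pyGetD_natCast]
        rfl
      rw [h0, h1]
      simp only [List.map_cons, List.tail_cons, List.zip_cons_cons, List.foldl_cons]
      rw [show (g t' :: List.map g rest).zip (List.map g rest)
            = (List.map g (t' :: rest)).zip ((List.map g (t' :: rest)).tail) from rfl]
      rw [← ih (f init (g t) (g t'))]
      have hL : PySem.List.pyRange 0 (((t' :: rest).length : Int) - 1) 1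
          = (List.range rest.length).map (fun k : Nat => ((0 : Int) + (k : Int))) := by
        rw [PySem.List.pyRange_one]
        congr 1
        simp
      have hR : PySem.List.pyRange (0 + 1) ((rest.length : Int) + 1) 1
          = (List.range rest.length).map (fun k : Nat => ((1 : Int) + (k : Int))) := by
        rw [PySem.List.pyRange_one]
        congr 1
        norm_num
      rw [hL, hR, List.foldl_map, List.foldl_map]
      apply PySem.List.foldl_congr_mem
      intro acc k _
      have e1 : (1 : Int) + (k : Int) = ((k + 1 : Nat) : Int) := by push_cast; ring
      have e2 : ((k + 1 : Nat) : Int) + 1 = ((k + 2 : Nat) : Int) := by push_cast; ring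
      have e3 : (0 : Int) + (k : Int) = ((k : Nat) : Int) := by ring
      have e4 : ((k : Nat) : Int) + 1 = ((k + 1 : Nat) : Int) := by push_cast; ring
      rw [e1, e2, e3, e4, PySem.List.pyGetD_natCast, PySem.List.pyGetD_natCast,
        PySem.List.pyGetD_natCast, PySem.List.pyGetD_natCast]
      simp [List.getD]

-- the zip fold appends exactly pairsSpec
theorem zip_fold_pairsSpec :
    ∀ (ts : List String) (acc : List (List String)),
    (ts.zip ts.tail).foldl
        (fun acc p => if p.1 ≠ "" ∧ p.2 ≠ "" then acc ++ [[p.1, p.2]] else acc) acc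
      = acc ++ pairsSpec ts := by
  intro ts
  induction ts with
  | nil => intro acc; simp [pairsSpec]
  | cons a ts ih =>
    cases ts with
    | nil => intro acc; simp [pairsSpec]
    | cons b r =>
      intro acc
      simp only [List.tail_cons, List.zip_cons_cons, List.foldl_cons]
      rw [show (b :: r).zip r = (b :: r).zip (b :: r).tail from rfl, ih]
      by_cases h : a ≠ "" ∧ b ≠ ""
      · simp [pairsSpec, h]
      · simp [pairsSpec, h]

-- B's reversed inner fold with a one-element memory produces pairsSpec reversed
theorem rev_fold_pairsSpec {α : Type} (g : α → String) :
    ∀ (lines : List α) (acc : List (List String)),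
    lines.foldr
        (fun line (st : List (List String) × Option String) =>
          (match st.2 with
            | some p => if g line ≠ "" ∧ p ≠ "" then st.1 ++ [[g line, p]] else st.1
            | none => st.1,
           some (g line)))
        (acc, none)
      = (acc ++ (pairsSpec (lines.map g)).reverse, (lines.map g).head?) := by
  intro lines
  induction lines with
  | nil => intro acc; simp [pairsSpec]
  | cons a rest ih =>
    intro acc
    simp only [List.foldr_cons, ih]
    cases rest with
    | nil => simp [pairsSpec]
    | cons b r =>
      simp only [List.map_cons, List.head?_cons]
      by_cases h : g a ≠ "" ∧ g b ≠ ""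
      · simp [pairsSpec, h]
      · simp [pairsSpec, h]

-- folding "acc ++ h c" is flatMap
theorem foldl_append_flatMap {α β : Type} (h : α → List β) :
    ∀ (l : List α) (acc : List β),
    l.foldl (fun acc c => acc ++ h c) acc = acc ++ l.flatMap h := by
  intro l
  induction l with
  | nil => intro acc; simp
  | cons c l ih => intro acc; simp [ih]

-- reversing a flatMap of reverses over the reversed list is the plain flatMap
theorem rev_flatMap_rev {α β : Type} (h : α → List β) :
    ∀ (l : List α), (l.reverse.flatMap (fun c => (h c).reverse)).reverse = l.flatMap h := by
  intro l
  induction l with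
  | nil => simp
  | cons c l ih => simp [ih]

-- ===== VERDICT (by name: the statement is the Claim_ definition above) =====
theorem extractSentencePairs_spec : Claim_equal_extractSentencePairs := by
  intro conversations _ _
  unfold Spec_extractSentencePairs extractSentencePairs extractSentencePairs_alt
  simp only []
  have hA : conversations.foldl (fun qa_pairs conversation =>
      let lines := ((PySem.Dict.mk conversation).get? "lines").getD []
      (PySem.List.pyRange 0 ((lines.length : Int) - 1) 1).foldl (fun qa_pairs i =>
        let inputLine := PySem.Str.strip (((PySem.Dict.mk (PySem.List.pyGetD lines i [])).get? "text").getD "")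
        let targetLine := PySem.Str.strip (((PySem.Dict.mk (PySem.List.pyGetD lines (i + 1) [])).get? "text").getD "")
        if inputLine ≠ "" ∧ targetLine ≠ "" then qa_pairs ++ [[inputLine, targetLine]] else qa_pairs)
        qa_pairs) []
      = conversations.flatMap (fun conversation =>
          pairsSpec ((((PySem.Dict.mk conversation).get? "lines").getD []).map
            (fun line => PySem.Str.strip (((PySem.Dict.mk line).get? "text").getD "")))) := by
    have step : conversations.foldl (fun qa_pairs conversation =>
        let lines := ((PySem.Dict.mk conversation).get? "lines").getD []
        (PySem.List.pyRange 0 ((lines.length : Int) - 1) 1).foldl (fun qa_pairs i =>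
          let inputLine := PySem.Str.strip (((PySem.Dict.mk (PySem.List.pyGetD lines i [])).get? "text").getD "")
          let targetLine := PySem.Str.strip (((PySem.Dict.mk (PySem.List.pyGetD lines (i + 1) [])).get? "text").getD "")
          if inputLine ≠ "" ∧ targetLine ≠ "" then qa_pairs ++ [[inputLine, targetLine]] else qa_pairs)
          qa_pairs) []
        = conversations.foldl (fun acc conversation =>
            acc ++ pairsSpec ((((PySem.Dict.mk conversation).get? "lines").getD []).map
              (fun line => PySem.Str.strip (((PySem.Dict.mk line).get? "text").getD "")))) [] := by
      apply PySem.List.foldl_congr_mem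
      intro acc conversation _
      rw [pairs_fold (fun line => PySem.Str.strip (((PySem.Dict.mk line).get? "text").getD "")) []
        (fun acc a b => if a ≠ "" ∧ b ≠ "" then acc ++ [[a, b]] else acc)]
      exact zip_fold_pairsSpec _ acc
    rw [step, foldl_append_flatMap]
    simp
  have hB : (conversations.reverse.foldl (fun qa_pairs conversation =>
      ((((PySem.Dict.mk conversation).get? "lines").getD []).reverse.foldl
        (fun (st : List (List String) × Option String) line =>
          let cur := PySem.Str.strip (((PySem.Dict.mk line).get? "text").getD "")
          (match st.2 with
            | some p => if cur ≠ "" ∧ p ≠ "" then st.1 ++ [[cur, p]] else st.1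
            | none => st.1,
           some cur))
        (qa_pairs, none)).1) []).reverse
      = conversations.flatMap (fun conversation =>
          pairsSpec ((((PySem.Dict.mk conversation).get? "lines").getD []).map
            (fun line => PySem.Str.strip (((PySem.Dict.mk line).get? "text").getD "")))) := by
    have hinner : ∀ (conversation : List (String × List (List (String × String))))
        (qa_pairs : List (List String)),
        ((((PySem.Dict.mk conversation).get? "lines").getD []).reverse.foldl
          (fun (st : List (List String) × Option String) line =>
            let cur := PySem.Str.strip (((PySem.Dict.mk line).get? "text").getD "")
            (match st.2 with
              | some p => if cur ≠ "" ∧ p ≠ "" then st.1 ++ [[cur, p]] else st.1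
              | none => st.1,
             some cur))
          (qa_pairs, none)).1
        = qa_pairs ++ (pairsSpec ((((PySem.Dict.mk conversation).get? "lines").getD []).map
            (fun line => PySem.Str.strip (((PySem.Dict.mk line).get? "text").getD "")))).reverse := by
      intro conversation qa_pairs
      rw [List.foldl_reverse]
      rw [rev_fold_pairsSpec (fun line => PySem.Str.strip (((PySem.Dict.mk line).get? "text").getD ""))]
    calc (conversations.reverse.foldl _ []).reverse
        = (conversations.reverse.foldl (fun qa_pairs conversation =>
            qa_pairs ++ (pairsSpec ((((PySem.Dict.mk conversation).get? "lines").getD []).map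
              (fun line => PySem.Str.strip (((PySem.Dict.mk line).get? "text").getD "")))).reverse) []).reverse := by
          congr 1
          apply PySem.List.foldl_congr_mem
          intro acc conversation _
          exact hinner conversation acc
      _ = _ := by
          rw [foldl_append_flatMap]
          simp only [List.nil_append]
          exact rev_flatMap_rev _ conversations
  rw [hA, hB]
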